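-- pv_equiv track=rewrite | github.com/text-machine-lab/cic | datasets/cmd_history.py | build_examples_from_convos
-- ===== SOURCE A (Python) =====
-- def build_examples_from_convos(convos, max_c_len=None, max_s_len=None):
--     """Turns each conversation into examples,
--     for each utterance in the conversation. Removes
--     examples which have contexts or responses that
--     are greater than the provided max lengths.
--
--     convos - list of lists of messages (list of conversations)
--     max_c_len - maximum length of each context
--     max_s_len - maximum length of response
--
--     Returns: returns examples of form (prev_utterances, utterance)."""
--     examples = []
--     for convo in convos:
--         for index in range(len(convo)):
--             response = convo[index]
--             prev_msgs = convo[:index]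
--             context = sum(prev_msgs, [])
--
--             if max_c_len is None or len(context) <= max_c_len:
--                 if max_s_len is None or len(response) <= max_s_len:
--                     examples.append([context, response])
--
--     return examples
-- ===== SOURCE B (Python) =====
-- def _contexts(convo):
--     """contexts[i] = flatten(convo[:i]): one running-prefix context per utterance."""
--     ctxs = []
--     ctx = []
--     for msg in convo:
--         ctxs.append(ctx)
--         ctx = ctx + msg
--     return ctxs
--
--
-- def build_examples_from_convos(convos, max_c_len=None, max_s_len=None):
--     """Pairs each utterance with its precomputed prefix context and keeps the
--     pairs passing the two length caps, as one comprehension."""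
--     return [
--         [ctx, resp]
--         for convo in convos
--         for ctx, resp in zip(_contexts(convo), convo)
--         if (max_c_len is None or len(ctx) <= max_c_len)
--         and (max_s_len is None or len(resp) <= max_s_len)
--     ]
-- ===== Notes on version B (the rewrite author's own statement) =====
-- stated objective: alternative
-- what changed: Replaces the nested index loop that re-slices and re-flattens every prefix with a staged pipeline: one linear precomputation of the prefix contexts per conversation, then a zip/filter/map comprehension builds the examples.
import Mathlib
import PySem

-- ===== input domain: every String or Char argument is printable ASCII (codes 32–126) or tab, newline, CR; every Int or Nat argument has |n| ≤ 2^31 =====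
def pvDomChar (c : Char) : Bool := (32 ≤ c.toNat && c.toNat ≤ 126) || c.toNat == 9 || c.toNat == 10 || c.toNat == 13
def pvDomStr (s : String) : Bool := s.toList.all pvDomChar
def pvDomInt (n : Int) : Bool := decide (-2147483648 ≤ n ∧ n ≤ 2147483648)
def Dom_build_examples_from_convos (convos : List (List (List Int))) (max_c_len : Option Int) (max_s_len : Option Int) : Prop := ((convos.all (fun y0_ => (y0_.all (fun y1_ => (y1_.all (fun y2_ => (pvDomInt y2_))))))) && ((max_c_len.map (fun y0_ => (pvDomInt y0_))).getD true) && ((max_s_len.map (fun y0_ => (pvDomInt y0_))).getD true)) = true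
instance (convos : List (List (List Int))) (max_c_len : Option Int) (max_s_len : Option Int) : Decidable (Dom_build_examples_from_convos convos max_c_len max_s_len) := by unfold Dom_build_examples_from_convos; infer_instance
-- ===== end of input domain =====

-- B replaces A's nested index loop (re-slicing and re-flattening every prefix) by a staged
-- pipeline: precompute each conversation's prefix contexts once, then zip/filter/map (objective: alternative).

-- ===== PORT A =====
-- transliteration of A: for each convo, for index in range(len(convo)):
--   response = convo[index]; prev_msgs = convo[:index]; context = sum(prev_msgs, []);
--   two nested length guards, then append [context, response].
def build_examples_from_convos (convos : List (List (List Int))) (max_c_len : Option Int) (max_s_len : Option Int) : List (List (List Int)) :=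
  convos.foldl (fun examples convo =>
    (PySem.List.pyRange 0 (convo.length : Int) 1).foldl (fun examples index =>
      let response := PySem.List.pyGetD convo index []   -- convo[index]; index from range(len(convo)) is in range
      let prev_msgs := PySem.List.slice convo none (some index)
      let context := prev_msgs.flatten                    -- sum(prev_msgs, [])
      if (match max_c_len with | none => true | some m => decide ((context.length : Int) ≤ m)) then
        if (match max_s_len with | none => true | some m => decide ((response.length : Int) ≤ m)) then
          examples ++ [[context, response]]
        else examples
      else examples) examples) []

-- ===== PORT B =====
-- helper _contexts of Source B: one loop over convo, collecting the running prefix context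
def pvContextsB (convo : List (List Int)) : List (List Int) :=
  (convo.foldl (fun (st : List (List Int) × List Int) msg =>
    (st.1 ++ [st.2], st.2 ++ msg)) (([], []) : List (List Int) × List Int)).1

-- transliteration of B's comprehension: flatMap over convos, zip with the precomputed
-- contexts, filter by the two length caps, map each surviving pair to [ctx, resp].
def build_examples_from_convos_alt (convos : List (List (List Int))) (max_c_len : Option Int) (max_s_len : Option Int) : List (List (List Int)) :=
  convos.flatMap (fun convo =>
    (((pvContextsB convo).zip convo).filter (fun p =>
        (match max_c_len with | none => true | some m => decide ((p.1.length : Int) ≤ m)) &&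
        (match max_s_len with | none => true | some m => decide ((p.2.length : Int) ≤ m)))).map
      (fun p => [p.1, p.2]))

-- ===== PRECONDITION & SPEC =====
def Spec_build_examples_from_convos (convos : List (List (List Int))) (max_c_len : Option Int) (max_s_len : Option Int) (out : List (List (List Int))) : Prop := out = build_examples_from_convos_alt convos max_c_len max_s_len
instance (convos : List (List (List Int))) (max_c_len : Option Int) (max_s_len : Option Int) (out : List (List (List Int))) : Decidable (Spec_build_examples_from_convos convos max_c_len max_s_len out) := by unfold Spec_build_examples_from_convos; infer_instance

-- ===== CLAIM =====
def Claim_equal_build_examples_from_convos : Prop := ∀ (convos : List (List (List Int))) (max_c_len : Option Int) (max_s_len : Option Int), Dom_build_examples_from_convos convos max_c_len max_s_len → Spec_build_examples_from_convos convos max_c_len max_s_len (build_examples_from_convos convos max_c_len max_s_len)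

-- ===== LEMMAS AND PROOFS =====

-- the example(s) emitted at one step, as a function of the current context and the response
def pvEmit (max_c_len max_s_len : Option Int) (context response : List Int) : List (List (List Int)) :=
  if (match max_c_len with | none => true | some m => decide ((context.length : Int) ≤ m)) then
    if (match max_s_len with | none => true | some m => decide ((response.length : Int) ≤ m)) then
      [[context, response]]
    else []
  else []

-- reference form of one conversation's examples, with running context
def pvGo (max_c_len max_s_len : Option Int) (context : List Int) : List (List Int) → List (List (List Int))
  | [] => []
  | r :: rs => pvEmit max_c_len max_s_len context r ++ pvGo max_c_len max_s_len (context ++ r) rs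

-- reference form of the context list, with running context
def pvCtxs (ctx : List Int) : List (List Int) → List (List Int)
  | [] => []
  | m :: rest => ctx :: pvCtxs (ctx ++ m) rest

-- A's inner index loop computes pvGo
theorem pvA_inner (mc ms : Option Int) :
    ∀ (convo : List (List Int)) (ex : List (List (List Int))) (pre : List Int),
      (List.range convo.length).foldl (fun ex i =>
        ex ++ pvEmit mc ms (pre ++ (convo.take i).flatten) (convo.getD i [])) ex
      = ex ++ pvGo mc ms pre convo := by
  intro convo
  induction convo with
  | nil => intro ex pre; simp [pvGo]
  | cons r rs ih =>
    intro ex pre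
    simp only [List.length_cons]
    rw [List.range_succ_eq_map]
    simp only [List.foldl_cons, List.foldl_map, List.take_zero, List.flatten_nil,
      List.append_nil, List.getD_cons_zero, List.take_succ_cons, List.flatten_cons,
      List.getD_cons_succ]
    have h := ih (ex ++ pvEmit mc ms pre r) (pre ++ r)
    calc (List.range rs.length).foldl (fun ex i =>
            ex ++ pvEmit mc ms (pre ++ (r ++ (rs.take i).flatten)) (rs.getD i []))
            (ex ++ pvEmit mc ms pre r)
        = (List.range rs.length).foldl (fun ex i =>
            ex ++ pvEmit mc ms ((pre ++ r) ++ (rs.take i).flatten) (rs.getD i []))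
            (ex ++ pvEmit mc ms pre r) := by
          simp [List.append_assoc]
      _ = ex ++ pvEmit mc ms pre r ++ pvGo mc ms (pre ++ r) rs := h
      _ = ex ++ pvGo mc ms pre (r :: rs) := by simp [pvGo]

-- A's literal step equals the pvEmit form
theorem pvA_step_eq (mc ms : Option Int) (ex : List (List (List Int))) (ctx r : List Int) :
    (if (match mc with | none => true | some m => decide ((ctx.length : Int) ≤ m)) then
        if (match ms with | none => true | some m => decide ((r.length : Int) ≤ m)) then
          ex ++ [[ctx, r]]
        else ex
      else ex)
    = ex ++ pvEmit mc ms ctx r := by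
  unfold pvEmit; split_ifs <;> simp

-- B's context-collecting fold computes pvCtxs
theorem pvContextsB_eq :
    ∀ (convo : List (List Int)) (acc : List (List Int)) (ctx : List Int),
      (convo.foldl (fun (st : List (List Int) × List Int) msg =>
        (st.1 ++ [st.2], st.2 ++ msg)) ((acc, ctx))).1 = acc ++ pvCtxs ctx convo := by
  intro convo
  induction convo with
  | nil => intro acc ctx; simp [pvCtxs]
  | cons m rest ih =>
    intro acc ctx
    simp only [List.foldl_cons]
    rw [ih]
    simp [pvCtxs]

-- B's zip/filter/map pipeline computes pvGo
theorem pvB_pipeline (mc ms : Option Int) :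
    ∀ (convo : List (List Int)) (ctx : List Int),
      (((pvCtxs ctx convo).zip convo).filter (fun p =>
          (match mc with | none => true | some m => decide ((p.1.length : Int) ≤ m)) &&
          (match ms with | none => true | some m => decide ((p.2.length : Int) ≤ m)))).map
        (fun p => [p.1, p.2])
      = pvGo mc ms ctx convo := by
  intro convo
  induction convo with
  | nil => intro ctx; simp [pvCtxs, pvGo]
  | cons r rs ih =>
    intro ctx
    simp only [pvCtxs, pvGo, List.zip_cons_cons, List.filter_cons]
    rw [← ih (ctx ++ r)]
    unfold pvEmit
    split_ifs with h1 h2 <;> simp_all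

-- ===== VERDICT =====
theorem build_examples_from_convos_spec : Claim_equal_build_examples_from_convos := by
  intro convos mc ms hdom
  clear hdom
  unfold Spec_build_examples_from_convos build_examples_from_convos build_examples_from_convos_alt
  -- A's outer loop: rewrite each inner index loop to pvGo, then fold-append = flatMap
  have hA : ∀ convo (ex : List (List (List Int))),
      (PySem.List.pyRange 0 (convo.length : Int) 1).foldl (fun ex index =>
        let response := PySem.List.pyGetD convo index []
        let prev_msgs := PySem.List.slice convo none (some index)
        let context := prev_msgs.flatten
        if (match mc with | none => true | some m => decide ((context.length : Int) ≤ m)) then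
          if (match ms with | none => true | some m => decide ((response.length : Int) ≤ m)) then
            ex ++ [[context, response]]
          else ex
        else ex) ex
      = ex ++ pvGo mc ms [] convo := by
    intro convo ex
    rw [PySem.List.pyRange_zero_natCast, List.foldl_map]
    rw [← pvA_inner mc ms convo ex []]
    apply PySem.List.foldl_congr_mem
    intro acc i hi
    simp only [PySem.List.pyGetD_natCast, PySem.List.slice_to_natCast, List.nil_append]
    exact pvA_step_eq mc ms acc ((convo.take i).flatten) (convo.getD i [])
  calc convos.foldl _ []
      = convos.foldl (fun ex convo => ex ++ pvGo mc ms [] convo) [] := by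
        apply PySem.List.foldl_congr_mem
        intro acc convo _
        exact hA convo acc
    _ = [] ++ convos.flatMap (fun convo => pvGo mc ms [] convo) :=
        PySem.List.foldl_append_eq_flatMap _ _ _
    _ = convos.flatMap (fun convo =>
          (((pvContextsB convo).zip convo).filter (fun p =>
              (match mc with | none => true | some m => decide ((p.1.length : Int) ≤ m)) &&
              (match ms with | none => true | some m => decide ((p.2.length : Int) ≤ m)))).map
            (fun p => [p.1, p.2])) := by
        simp only [List.nil_append]
        apply List.flatMap_congr
        intro convo _
        rw [show pvContextsB convo = pvCtxs [] convo from by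
              simpa using pvContextsB_eq convo [] []]
        exact (pvB_pipeline mc ms convo []).symm
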